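-- pv_equiv track=rewrite | github.com/IAmJonoBo/Prometheus | chiron/tools/format_yaml.py | _scan_literal_block_issues
-- ===== SOURCE A (Python) =====
-- def _is_literal_block_start(line: str) -> bool:
--     stripped = line.lstrip()
--     return stripped.startswith("run: |")
--
-- def _inspect_literal_block(
--     lines: list[str], start_index: int, base_indent: int
-- ) -> tuple[int, list[tuple[int, str]]]:
--     issues: list[tuple[int, str]] = []
--     min_indent = base_indent + 2
--     index = start_index + 1
--     total = len(lines)
--     while index < total:
--         candidate = lines[index]
--         stripped = candidate.rstrip("\n")
--         stripped_content = stripped.lstrip()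
--         if stripped_content == "":
--             index += 1
--             continue
--         indent = len(candidate) - len(candidate.lstrip(" "))
--         is_comment = stripped_content.startswith("#")
--         if indent <= base_indent and not is_comment:
--             break
--         if not is_comment and indent < min_indent:
--             issues.append(
--                 (
--                     index + 1,
--                     "literal block line is indented "
--                     f"{indent} spaces; expected at least {min_indent}",
--                 )
--             )
--         index += 1
--     return index, issues
--
-- def _scan_literal_block_issues(lines: list[str]) -> list[tuple[int, str]]:
--     issues: list[tuple[int, str]] = []
--     index = 0
--     total = len(lines)
--     while index < total:
--         line = lines[index]
--         if _is_literal_block_start(line):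
--             base_indent = len(line) - len(line.lstrip(" "))
--             index, block_issues = _inspect_literal_block(lines, index, base_indent)
--             issues.extend(block_issues)
--         else:
--             index += 1
--     return issues
-- ===== SOURCE B (Python) =====
-- def _scan_literal_block_issues(lines: list[str]) -> list[tuple[int, str]]:
--     # Stage 1: classify every line once (line number, blank?, comment?, block-start?, indent).
--     records = [
--         (
--             i + 1,
--             line.rstrip("\n").lstrip() == "",
--             line.rstrip("\n").lstrip().startswith("#"),
--             line.lstrip().startswith("run: |"),
--             len(line) - len(line.lstrip(" ")),
--         )
--         for i, line in enumerate(lines)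
--     ]
--     # Stage 2: fold over the records with state base = current block indent (or None).
--     issues: list[tuple[int, str]] = []
--     base = None
--     for lineno, blank, comment, start, indent in records:
--         if base is not None:
--             if blank or comment:
--                 continue
--             if indent <= base:
--                 base = None  # block ends here; this same record may start a new one
--             elif indent < base + 2:
--                 issues.append(
--                     (
--                         lineno,
--                         "literal block line is indented "
--                         f"{indent} spaces; expected at least {base + 2}",
--                     )
--                 )
--                 continue
--             else:
--                 continue
--         if base is None and start:
--             base = indent
--     return issues
-- ===== Notes on version B (the rewrite author's own statement) =====
-- stated objective: alternative
-- what changed: Replaced A's nested two-level index scan (outer loop calling a helper that walks the block and returns a resume index, so the exit line is re-examined) with two staged passes: a classification pass that precomputes (lineno, blank, comment, start, indent) records for every line, then a single fold over the records with an Optional base-indent state in which leaving a block and testing the same line as a new start happen inside one step, eliminating index arithmetic and the re-test replay.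
import Mathlib
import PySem

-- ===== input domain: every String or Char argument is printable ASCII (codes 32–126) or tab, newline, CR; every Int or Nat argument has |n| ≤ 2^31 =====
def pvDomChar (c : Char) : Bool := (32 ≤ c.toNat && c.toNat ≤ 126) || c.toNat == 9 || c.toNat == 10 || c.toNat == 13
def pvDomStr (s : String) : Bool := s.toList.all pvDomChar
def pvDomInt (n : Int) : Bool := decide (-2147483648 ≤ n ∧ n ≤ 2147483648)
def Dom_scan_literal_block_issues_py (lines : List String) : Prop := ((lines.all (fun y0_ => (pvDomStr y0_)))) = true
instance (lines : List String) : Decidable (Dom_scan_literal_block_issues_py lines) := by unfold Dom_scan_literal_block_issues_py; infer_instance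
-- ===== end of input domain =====

-- B replaces A's nested two-level index scan (helper returning a resume index) with two
-- staged passes: a per-line classification pass, then a single fold over the records with
-- an Option base-indent state (alternative decomposition; same linear cost, same results).


-- ===== PORT A =====
-- candidate.rstrip("\n"): drops trailing '\n' only — exact (single strip char)
def pvRstripNl (cs : List Char) : List Char := (cs.reverse.dropWhile (· == '\n')).reverse

-- len(line) - len(line.lstrip(" ")): lstrip(" ") drops leading ' ' only — exact
def pvIndentOf (s : String) : Nat := s.toList.length - (s.toList.dropWhile (· == ' ')).length

def pvMsg (indent minIndent : Nat) : String :=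
  "literal block line is indented " ++ PySem.Int.toStr (indent : Int) ++
    " spaces; expected at least " ++ PySem.Int.toStr (minIndent : Int)

-- _is_literal_block_start
def pvIsBlockStart (line : String) : Bool :=
  PySem.Chars.startswith (PySem.Chars.lstrip line.toList) "run: |".toList

theorem pvDecStep (L i : Nat) (h : i < L) : L - (i + 1) < L - i := Nat.sub_succ_lt_self L i h

-- the while loop of _inspect_literal_block (returns the final index and the issues)
def pvInspect (lines : List String) (baseIndent : Nat) (index : Nat)
    (issues : List (Int × String)) : Nat × List (Int × String) :=
  if h : index < lines.length then
    let candidate := lines[index]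
    let stripped := pvRstripNl candidate.toList
    let strippedContent := PySem.Chars.lstrip stripped
    if strippedContent = [] then
      pvInspect lines baseIndent (index + 1) issues
    else
      let indent := pvIndentOf candidate
      let isComment := PySem.Chars.startswith strippedContent ['#']
      if indent ≤ baseIndent ∧ isComment = false then
        (index, issues)
      else if isComment = false ∧ indent < baseIndent + 2 then
        pvInspect lines baseIndent (index + 1)
          (issues ++ [((index : Int) + 1, pvMsg indent (baseIndent + 2))])
      else
        pvInspect lines baseIndent (index + 1) issues
  else (index, issues)
termination_by lines.length - index
decreasing_by all_goals exact pvDecStep lines.length index h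

-- the while loop of _scan_literal_block_issues; fuel (= lines.length at the top call)
-- only makes the recursion structural: index grows by at least 1 per iteration, so the
-- fuel is never exhausted before the loop's own exit condition index >= len(lines)
def pvScanA : List String → Nat → Nat → List (Int × String) → List (Int × String)
  | _, 0, _, issues => issues
  | lines, fuel + 1, index, issues =>
    if h : index < lines.length then
      let line := lines[index]
      if pvIsBlockStart line then
        let r := pvInspect lines (pvIndentOf line) (index + 1) []
        pvScanA lines fuel r.1 (issues ++ r.2)
      else
        pvScanA lines fuel (index + 1) issues
    else issues

def scan_literal_block_issues_py (lines : List String) : List (Int × String) :=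
  pvScanA lines lines.length 0 []

-- ===== PORT B =====
-- stage 1 of Source B: one record (lineno, blank, comment, start, indent) per line
def pvClassify (i : Nat) (line : String) : Int × Bool × Bool × Bool × Nat :=
  ((i : Int) + 1,
   decide (PySem.Chars.lstrip (pvRstripNl line.toList) = []),
   PySem.Chars.startswith (PySem.Chars.lstrip (pvRstripNl line.toList)) ['#'],
   PySem.Chars.startswith (PySem.Chars.lstrip line.toList) "run: |".toList,
   line.toList.length - (line.toList.dropWhile (· == ' ')).length)

-- stage 2 of Source B: one step of the fold, state = (base : Option Nat, issues)
def pvStep (st : Option Nat × List (Int × String)) (r : Int × Bool × Bool × Bool × Nat) :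
    Option Nat × List (Int × String) :=
  match r with
  | (lineno, blank, comment, start, indent) =>
    match st.1 with
    | some b =>
      if blank || comment then st
      else if indent ≤ b then (if start then some indent else none, st.2)
      else if indent < b + 2 then (some b, st.2 ++ [(lineno, pvMsg indent (b + 2))])
      else (some b, st.2)
    | none => (if start then some indent else none, st.2)

-- the comprehension over enumerate(lines) as a map over the index range
def pvRecords (lines : List String) : List (Int × Bool × Bool × Bool × Nat) :=
  (List.range lines.length).map (fun i => pvClassify i lines[i]!)

def scan_literal_block_issues_py_alt (lines : List String) : List (Int × String) :=
  ((pvRecords lines).foldl pvStep (none, [])).2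

-- ===== PRECONDITION & SPEC =====
def Spec_scan_literal_block_issues_py (lines : List String) (out : List (Int × String)) : Prop := out = scan_literal_block_issues_py_alt lines
instance (lines : List String) (out : List (Int × String)) : Decidable (Spec_scan_literal_block_issues_py lines out) := by unfold Spec_scan_literal_block_issues_py; infer_instance

-- ===== CLAIM (what is proved, stated in full; the proofs are below) =====
def Claim_equal_scan_literal_block_issues_py : Prop := ∀ (lines : List String), Dom_scan_literal_block_issues_py lines → Spec_scan_literal_block_issues_py lines (scan_literal_block_issues_py lines)

-- ===== LEMMAS AND PROOFS =====

-- the fold over the record suffix starting at index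
def pvFoldFrom (lines : List String) (index : Nat) (st : Option Nat × List (Int × String)) :
    Option Nat × List (Int × String) :=
  ((pvRecords lines).drop index).foldl pvStep st

theorem pvFoldFrom_stop (lines : List String) (index : Nat)
    (h : lines.length ≤ index) (st : Option Nat × List (Int × String)) :
    pvFoldFrom lines index st = st := by
  unfold pvFoldFrom
  rw [List.drop_eq_nil_of_le (by simp [pvRecords]; omega)]
  rfl

theorem pvFoldFrom_step (lines : List String) (index : Nat) (h : index < lines.length)
    (st : Option Nat × List (Int × String)) :
    pvFoldFrom lines index st
      = pvFoldFrom lines (index + 1) (pvStep st (pvClassify index lines[index])) := by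
  unfold pvFoldFrom
  have hlen : index < (pvRecords lines).length := by simpa [pvRecords] using h
  rw [List.drop_eq_getElem_cons hlen]
  simp [pvRecords, List.getElem!_eq_getElem?_getD,
    List.getElem?_eq_getElem h]

-- A's inner loop never moves the index backwards
theorem pvInspect_fst_ge_aux (lines : List String) (baseIndent : Nat) :
    ∀ (n index : Nat) (issues : List (Int × String)), lines.length - index ≤ n →
      index ≤ (pvInspect lines baseIndent index issues).1 := by
  intro n
  induction n with
  | zero =>
    intro index issues h
    rw [pvInspect, dif_neg (by omega)]
  | succ n ih =>
    intro index issues h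
    rw [pvInspect]
    split
    · rename_i hlt
      dsimp only
      split
      · exact le_trans (by omega) (ih _ _ (by omega))
      · split
        · simp
        · split
          · exact le_trans (by omega) (ih _ _ (by omega))
          · exact le_trans (by omega) (ih _ _ (by omega))
    · simp

theorem pvInspect_fst_ge (lines : List String) (baseIndent index : Nat)
    (issues : List (Int × String)) : index ≤ (pvInspect lines baseIndent index issues).1 :=
  pvInspect_fst_ge_aux lines baseIndent (lines.length - index) index issues (le_refl _)

-- folding in block mode from index = finishing A's inner loop, then folding out of block
theorem pvFold_block_aux (lines : List String) (b : Nat) :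
    ∀ (n index : Nat), lines.length - index ≤ n →
      ∀ (issues0 acc : List (Int × String)),
      (pvFoldFrom lines index (some b, acc ++ issues0)).2
        = (pvFoldFrom lines (pvInspect lines b index issues0).1
            (none, acc ++ (pvInspect lines b index issues0).2)).2 := by
  intro n
  induction n with
  | zero =>
    intro index h issues0 acc
    rw [pvInspect, dif_neg (by omega)]
    rw [pvFoldFrom_stop lines index (by omega), pvFoldFrom_stop lines index (by omega)]
  | succ n ih =>
    intro index h issues0 acc
    by_cases hlt : index < lines.length
    · rw [pvInspect, dif_pos hlt]
      rw [pvFoldFrom_step lines index hlt]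
      dsimp only
      by_cases h1 : PySem.Chars.lstrip (pvRstripNl lines[index].toList) = []
      · rw [if_pos h1]
        have hstep : pvStep (some b, acc ++ issues0) (pvClassify index lines[index])
            = (some b, acc ++ issues0) := by
          simp [pvStep, pvClassify, h1]
        rw [hstep]
        exact ih (index + 1) (by omega) issues0 acc
      · rw [if_neg h1]
        by_cases h2 : PySem.Chars.startswith (PySem.Chars.lstrip (pvRstripNl lines[index].toList)) ['#'] = true
        · have hstep : pvStep (some b, acc ++ issues0) (pvClassify index lines[index])
              = (some b, acc ++ issues0) := by
            simp [pvStep, pvClassify, h2]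
          rw [hstep]
          have hni : ¬ (pvIndentOf lines[index] ≤ b ∧
              PySem.Chars.startswith (PySem.Chars.lstrip (pvRstripNl lines[index].toList)) ['#'] = false) := by
            simp [h2]
          rw [if_neg hni]
          have hnc : ¬ (PySem.Chars.startswith (PySem.Chars.lstrip (pvRstripNl lines[index].toList)) ['#'] = false ∧
              pvIndentOf lines[index] < b + 2) := by
            simp [h2]
          rw [if_neg hnc]
          exact ih (index + 1) (by omega) issues0 acc
        · have h2' : PySem.Chars.startswith (PySem.Chars.lstrip (pvRstripNl lines[index].toList)) ['#'] = false :=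
            Bool.eq_false_iff.mpr h2
          by_cases h3 : pvIndentOf lines[index] ≤ b
          · -- exit step: both sides fold from the same state
            rw [if_pos ⟨h3, h2'⟩]
            dsimp only
            rw [pvFoldFrom_step lines index hlt]
            have h3' : lines[index].toList.length -
                (lines[index].toList.dropWhile (· == ' ')).length ≤ b := by
              simpa [pvIndentOf] using h3
            have hstepL : pvStep (some b, acc ++ issues0) (pvClassify index lines[index])
                = pvStep (none, acc ++ issues0) (pvClassify index lines[index]) := by
              simp only [pvStep, pvClassify]
              rw [if_neg (by simp [h1, h2']), if_pos h3']
            rw [hstepL]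
          · rw [if_neg (by simp [h3])]
            by_cases h4 : pvIndentOf lines[index] < b + 2
            · rw [if_pos ⟨h2', h4⟩]
              have h3' : ¬ (lines[index].toList.length -
                  (lines[index].toList.dropWhile (· == ' ')).length ≤ b) := by
                simpa [pvIndentOf] using h3
              have h4' : lines[index].toList.length -
                  (lines[index].toList.dropWhile (· == ' ')).length < b + 2 := by
                simpa [pvIndentOf] using h4
              have hstep : pvStep (some b, acc ++ issues0) (pvClassify index lines[index])
                  = (some b, acc ++ (issues0 ++ [((index : Int) + 1, pvMsg (pvIndentOf lines[index]) (b + 2))])) := by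
                simp only [pvStep, pvClassify]
                rw [if_neg (by simp [h1, h2']), if_neg h3', if_pos h4']
                simp [pvIndentOf]
              rw [hstep]
              exact ih (index + 1) (by omega)
                (issues0 ++ [((index : Int) + 1, pvMsg (pvIndentOf lines[index]) (b + 2))]) acc
            · rw [if_neg (by simp [h4])]
              have h3' : ¬ (lines[index].toList.length -
                  (lines[index].toList.dropWhile (· == ' ')).length ≤ b) := by
                simpa [pvIndentOf] using h3
              have h4' : ¬ (lines[index].toList.length -
                  (lines[index].toList.dropWhile (· == ' ')).length < b + 2) := by
                simpa [pvIndentOf] using h4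
              have hstep : pvStep (some b, acc ++ issues0) (pvClassify index lines[index])
                  = (some b, acc ++ issues0) := by
                simp only [pvStep, pvClassify]
                rw [if_neg (by simp [h1, h2']), if_neg h3', if_neg h4']
              rw [hstep]
              exact ih (index + 1) (by omega) issues0 acc
    · rw [pvInspect, dif_neg hlt]
      rw [pvFoldFrom_stop lines index (by omega), pvFoldFrom_stop lines index (by omega)]

-- A's outer loop equals B's fold out of block mode
theorem pvScanA_eq_aux (lines : List String) :
    ∀ (n index : Nat), lines.length - index ≤ n →
      ∀ (issues : List (Int × String)),
        pvScanA lines n index issues = (pvFoldFrom lines index (none, issues)).2 := by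
  intro n
  induction n with
  | zero =>
    intro index h issues
    rw [pvScanA, pvFoldFrom_stop lines index (by omega)]
  | succ n ih =>
    intro index h issues
    by_cases hlt : index < lines.length
    · rw [pvScanA, dif_pos hlt]
      rw [pvFoldFrom_step lines index hlt]
      dsimp only
      by_cases hs : pvIsBlockStart lines[index] = true
      · rw [if_pos hs]
        have hstep : pvStep (none, issues) (pvClassify index lines[index])
            = (some (pvIndentOf lines[index]), issues) := by
          have hrun : PySem.Chars.startswith (PySem.Chars.lstrip lines[index].toList)
              ['r', 'u', 'n', ':', ' ', '|'] = true := by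
            simpa [pvIsBlockStart] using hs
          simp [pvStep, pvClassify, hrun, pvIndentOf]
        rw [hstep]
        have hge := pvInspect_fst_ge lines (pvIndentOf lines[index]) (index + 1) []
        have hblock := pvFold_block_aux lines (pvIndentOf lines[index]) (n + 1) (index + 1)
          (by omega) [] issues
        have hih := ih (pvInspect lines (pvIndentOf lines[index]) (index + 1) []).1
          (by omega)
          (issues ++ (pvInspect lines (pvIndentOf lines[index]) (index + 1) []).2)
        simp only [List.append_nil] at hblock
        rw [hih, ← hblock]
      · rw [if_neg hs]
        have hstep : pvStep (none, issues) (pvClassify index lines[index])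
            = (none, issues) := by
          have hrun : PySem.Chars.startswith (PySem.Chars.lstrip lines[index].toList)
              ['r', 'u', 'n', ':', ' ', '|'] = false := by
            simpa [pvIsBlockStart] using Bool.eq_false_iff.mpr hs
          simp [pvStep, pvClassify, hrun]
        rw [hstep]
        exact ih (index + 1) (by omega) issues
    · rw [pvScanA, dif_neg hlt, pvFoldFrom_stop lines index (by omega)]

-- ===== VERDICT (by name: the statement is the Claim_ definition above) =====
theorem scan_literal_block_issues_py_spec : Claim_equal_scan_literal_block_issues_py := by
  intro lines _
  unfold Spec_scan_literal_block_issues_py scan_literal_block_issues_py scan_literal_block_issues_py_alt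
  exact pvScanA_eq_aux lines lines.length 0 (by omega) []
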